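-- pv_equiv track=rewrite | github.com/Alexander-Berg/2022-tests-examples-2 | sandbox/general/test_stat.py | change_stat_msg
-- ===== SOURCE A (Python) =====
-- def change_stat_msg(stat_old, stat_new):
--
--         rows = []
--
--         if not stat_old or not stat_new:
--             return "Result file not found"
--
--         rows.append("Total: {} -> {} ({})\n".format(stat_old['total'], stat_new['total'],
--                                                     stat_new['total'] - stat_old['total']))
--
--         for st in stat_old:
--             if st != 'total':
--                 st_new = stat_new[st] if st in stat_new else 0
--                 rows.append("{}: {} -> {} ({})\n".format(st,
--                                                          stat_old[st], st_new,
--                                                          st_new - stat_old[st]))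
--
--         for st in stat_new:
--             if st not in stat_old:
--                 rows.append("{}: {} -> {} ({})\n".format(st,
--                                                          0, stat_new[st],
--                                                          stat_new[st]))
--
--         return "".join(rows)
-- ===== SOURCE B (Python) =====
-- def change_stat_msg(stat_old, stat_new):
--     if not stat_old or not stat_new:
--         return "Result file not found"
--     # Merge both stats into one dict  key -> (old_value, new_value)
--     merged = {k: (v, 0) for k, v in stat_old.items()}
--     for k, v in stat_new.items():
--         merged[k] = (merged.get(k, (0, 0))[0], v)
--     o, n = merged['total']
--     rows = ["Total: {} -> {} ({})\n".format(o, n, n - o)]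
--     rows += ["{}: {} -> {} ({})\n".format(k, o, n, n - o)
--              for k, (o, n) in merged.items() if k != 'total']
--     return "".join(rows)
-- ===== Notes on version B (the rewrite author's own statement) =====
-- stated objective: alternative
-- what changed: B merges both stats once into a single dict mapping each key to an (old_value, new_value) pair and emits every row from that one structure, instead of A's two separate row-building loops that cross-look-up the other dict per key.
import Mathlib
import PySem

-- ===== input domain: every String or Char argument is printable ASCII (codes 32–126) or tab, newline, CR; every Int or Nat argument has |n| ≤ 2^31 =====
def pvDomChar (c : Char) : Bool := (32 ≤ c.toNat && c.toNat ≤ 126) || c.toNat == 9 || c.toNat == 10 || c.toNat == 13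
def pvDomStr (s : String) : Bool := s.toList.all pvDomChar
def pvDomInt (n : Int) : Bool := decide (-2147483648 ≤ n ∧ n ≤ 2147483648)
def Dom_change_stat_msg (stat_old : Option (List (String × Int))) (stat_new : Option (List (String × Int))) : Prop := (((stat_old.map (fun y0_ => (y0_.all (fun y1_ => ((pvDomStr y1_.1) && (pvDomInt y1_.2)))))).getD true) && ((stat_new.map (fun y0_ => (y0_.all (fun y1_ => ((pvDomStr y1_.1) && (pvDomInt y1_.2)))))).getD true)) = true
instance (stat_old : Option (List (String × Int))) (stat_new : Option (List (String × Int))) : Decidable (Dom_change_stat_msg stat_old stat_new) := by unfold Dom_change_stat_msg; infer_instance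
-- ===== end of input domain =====

-- B merges both stats once into a single dict key -> (old_value, new_value) and then emits every
-- row from that one structure, replacing A's two row-building loops with cross-dict lookups
-- (objective: alternative); return values only, neither implementation mutates its arguments.

-- ===== PORT A =====
-- "{}: {} -> {} ({})\n".format(label, ov, nv, nv - ov)
def csmRowA (label : String) (ov : Int) (nv : Int) : String :=
  PySem.Str.join "" [label, ": ", PySem.Int.toStr ov, " -> ", PySem.Int.toStr nv, " (", PySem.Int.toStr (nv - ov), ")\n"]

def change_stat_msg (stat_old : Option (List (String × Int))) (stat_new : Option (List (String × Int))) : String :=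
  match stat_old, stat_new with
  | some lo, some ln =>
    if lo.isEmpty || ln.isEmpty then "Result file not found"
    else
      let dOld := PySem.Dict.ofList lo
      let dNew := PySem.Dict.ofList ln
      -- stat_old['total'] / stat_new['total'] direct indexing: getD is exact only under
      -- Pre_change_stat_msg, which excludes the KeyError inputs ('total' absent)
      let rows := [csmRowA "Total" (dOld.getD "total" 0) (dNew.getD "total" 0)]
      let rows := dOld.keys.foldl (fun rs st =>
        if st != "total" then rs ++ [csmRowA st (dOld.getD st 0) (dNew.getD st 0)] else rs) rows
      let rows := dNew.keys.foldl (fun rs st =>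
        if !(dOld.contains st) then rs ++ [csmRowA st 0 (dNew.getD st 0)] else rs) rows
      PySem.Str.join "" rows
  | _, _ => "Result file not found"

-- ===== PORT B =====
-- "{}: {} -> {} ({})\n".format(k, o, n, n - o)
def csmRowB (k : String) (ov : Int) (nv : Int) : String :=
  PySem.Str.join "" [k, ": ", PySem.Int.toStr ov, " -> ", PySem.Int.toStr nv, " (", PySem.Int.toStr (nv - ov), ")\n"]

def change_stat_msg_alt (stat_old : Option (List (String × Int))) (stat_new : Option (List (String × Int))) : String :=
  match stat_old with
  | none => "Result file not found"
  | some lo =>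
  match stat_new with
  | none => "Result file not found"
  | some ln =>
    if lo.isEmpty || ln.isEmpty then "Result file not found"
    else
      -- merged = {k: (v, 0) for k, v in stat_old.items()}
      let merged : PySem.Dict String (Int × Int) :=
        lo.foldl (fun d p => d.insert p.1 (p.2, (0 : Int))) PySem.Dict.empty
      -- for k, v in stat_new.items(): merged[k] = (merged.get(k, (0, 0))[0], v)
      let merged : PySem.Dict String (Int × Int) :=
        ln.foldl (fun d p => d.insert p.1 ((d.getD p.1 ((0 : Int), (0 : Int))).1, p.2)) merged
      -- o, n = merged['total']: getD is exact whenever 'total' occurs in either dict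
      -- (in particular everywhere inside Pre_change_stat_msg)
      let t := merged.getD "total" (0, 0)
      PySem.Str.join "" (csmRowB "Total" t.1 t.2 ::
        (merged.items.filter (fun p => p.1 != "total")).map (fun p => csmRowB p.1 p.2.1 p.2.2))

-- ===== PRECONDITION & SPEC =====
-- Pre_ excludes exactly the inputs on which A raises KeyError: both dicts non-empty but 'total' missing from one.
def Pre_change_stat_msg (stat_old : Option (List (String × Int))) (stat_new : Option (List (String × Int))) : Prop :=
  stat_old.getD [] = [] ∨ stat_new.getD [] = [] ∨
    ("total" ∈ (stat_old.getD []).map Prod.fst ∧ "total" ∈ (stat_new.getD []).map Prod.fst)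
instance (stat_old : Option (List (String × Int))) (stat_new : Option (List (String × Int))) : Decidable (Pre_change_stat_msg stat_old stat_new) := by unfold Pre_change_stat_msg; infer_instance
def pvWitness_change_stat_msg : (Option (List (String × Int))) × (Option (List (String × Int))) :=
  (some [("total", 3), ("x", 1)], some [("total", 5), ("y", 2)])

def Spec_change_stat_msg (stat_old : Option (List (String × Int))) (stat_new : Option (List (String × Int))) (out : String) : Prop := out = change_stat_msg_alt stat_old stat_new
instance (stat_old : Option (List (String × Int))) (stat_new : Option (List (String × Int))) (out : String) : Decidable (Spec_change_stat_msg stat_old stat_new out) := by unfold Spec_change_stat_msg; infer_instance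

-- ===== CLAIM (what is proved, stated in full; the proofs are below) =====
def Claim_equal_change_stat_msg : Prop := ∀ (stat_old : Option (List (String × Int))) (stat_new : Option (List (String × Int))), Dom_change_stat_msg stat_old stat_new → Pre_change_stat_msg stat_old stat_new → Spec_change_stat_msg stat_old stat_new (change_stat_msg stat_old stat_new)

-- ===== LEMMAS AND PROOFS =====

lemma csm_contains_ofList (lo : List (String × Int)) (k : String) :
    (PySem.Dict.ofList lo).contains k = true ↔ k ∈ lo.map Prod.fst := by
  simp [PySem.Dict.ofList, PySem.Dict.update, PySem.Dict.contains_iff_mem_keys]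
  have h := PySem.Dict.keys_foldl_insert_key (ν := Int) lo Prod.fst (fun _ p => p.2) PySem.Dict.empty
  simp only [h]
  simp [PySem.Set.mem_update, PySem.Dict.keys_empty]

-- merged after phase 1 looks up as (stat_old value, 0) at every key
lemma csm_m1_getD (lo : List (String × Int)) (e : PySem.Dict String (Int × Int))
    (d : PySem.Dict String Int) (h : ∀ k, e.getD k (0, 0) = (d.getD k 0, 0)) (k : String) :
    (lo.foldl (fun d p => d.insert p.1 (p.2, (0 : Int))) e).getD k (0, 0)
      = ((lo.foldl (fun d p => d.insert p.1 p.2) d).getD k 0, 0) := by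
  induction lo generalizing e d with
  | nil => exact h k
  | cons p rest ih =>
      simp only [List.foldl_cons]
      refine ih _ _ (fun k' => ?_)
      rw [PySem.Dict.getD_insert, PySem.Dict.getD_insert]
      split_ifs with hh
      · rfl
      · exact h k' 

-- phase 2 never changes the first (old-value) component of any lookup
lemma csm_m2_fst (ln : List (String × Int)) (e : PySem.Dict String (Int × Int)) (k : String) :
    ((ln.foldl (fun d p => d.insert p.1 ((d.getD p.1 ((0 : Int), (0 : Int))).1, p.2)) e).getD k (0, 0)).1
      = (e.getD k (0, 0)).1 := by
  induction ln generalizing e with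
  | nil => rfl
  | cons p rest ih =>
      simp only [List.foldl_cons]
      rw [ih]
      rw [PySem.Dict.getD_insert]
      split_ifs with h
      · rw [h]
      · rfl

-- the second (new-value) component of phase 2 tracks plain insertion of stat_new
lemma csm_m2_snd (ln : List (String × Int)) (e : PySem.Dict String (Int × Int))
    (d : PySem.Dict String Int) (h : ∀ k, (e.getD k (0, 0)).2 = d.getD k 0) (k : String) :
    ((ln.foldl (fun d p => d.insert p.1 ((d.getD p.1 ((0 : Int), (0 : Int))).1, p.2)) e).getD k (0, 0)).2
      = (ln.foldl (fun d p => d.insert p.1 p.2) d).getD k 0 := by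
  induction ln generalizing e d with
  | nil => exact h k
  | cons p rest ih =>
      simp only [List.foldl_cons]
      refine ih _ _ (fun k' => ?_)
      rw [PySem.Dict.getD_insert, PySem.Dict.getD_insert]
      split_ifs with hh
      · rfl
      · exact h k' 

-- the merged dict looks up as (stat_old.get(k,0), stat_new.get(k,0)) at every key
lemma csm_merged_getD (lo ln : List (String × Int)) (k : String) :
    ((ln.foldl (fun d p => d.insert p.1 ((d.getD p.1 ((0 : Int), (0 : Int))).1, p.2))
        (lo.foldl (fun d p => d.insert p.1 (p.2, (0 : Int))) PySem.Dict.empty)).getD k (0, 0))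
      = ((PySem.Dict.ofList lo).getD k 0, (PySem.Dict.ofList ln).getD k 0) := by
  have h1 : ∀ k, (lo.foldl (fun d p => d.insert p.1 (p.2, (0 : Int))) PySem.Dict.empty).getD k (0, 0)
      = ((PySem.Dict.ofList lo).getD k 0, 0) := by
    intro k
    simpa [PySem.Dict.ofList, PySem.Dict.update] using
      csm_m1_getD lo PySem.Dict.empty PySem.Dict.empty (by simp [PySem.Dict.getD_empty]) k
  refine Prod.ext ?_ ?_
  · rw [csm_m2_fst, h1]
  · rw [csm_m2_snd ln _ PySem.Dict.empty (fun k' => by simp [h1, PySem.Dict.getD_empty])]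
    simp [PySem.Dict.ofList, PySem.Dict.update]

-- the merged dict's key order is stat_old's keys followed by stat_new's new keys
lemma csm_merged_keys (lo ln : List (String × Int)) :
    (ln.foldl (fun d p => d.insert p.1 ((d.getD p.1 ((0 : Int), (0 : Int))).1, p.2))
        (lo.foldl (fun d p => d.insert p.1 (p.2, (0 : Int))) PySem.Dict.empty)).keys
      = (PySem.Dict.ofList lo).keys
        ++ (PySem.Dict.ofList ln).keys.filter (fun k => !((PySem.Dict.ofList lo).contains k)) := by
  have hko : (PySem.Dict.ofList (κ := String) (ν := Int) lo).keys = PySem.Set.ofList (lo.map Prod.fst) := by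
    simp [PySem.Dict.ofList, PySem.Dict.update]
    rw [PySem.Dict.keys_foldl_insert_key lo Prod.fst (fun _ p => p.2) PySem.Dict.empty]
    simp [PySem.Dict.keys_empty, PySem.Set.update_nil_left]
  have hkn : (PySem.Dict.ofList (κ := String) (ν := Int) ln).keys = PySem.Set.ofList (ln.map Prod.fst) := by
    simp [PySem.Dict.ofList, PySem.Dict.update]
    rw [PySem.Dict.keys_foldl_insert_key ln Prod.fst (fun _ p => p.2) PySem.Dict.empty]
    simp [PySem.Dict.keys_empty, PySem.Set.update_nil_left]
  rw [PySem.Dict.keys_foldl_insert_key ln Prod.fst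
      (fun d p => ((d.getD p.1 ((0 : Int), (0 : Int))).1, p.2)) _]
  rw [PySem.Dict.keys_foldl_insert_key lo Prod.fst (fun _ p => (p.2, (0 : Int))) PySem.Dict.empty]
  rw [PySem.Dict.keys_empty, PySem.Set.update_nil_left, PySem.Set.update_eq_append_filter]
  rw [hko, hkn]
  congr 1
  apply List.filter_congr
  intro k _
  congr 1
  rw [← hko]
  rw [Bool.eq_iff_iff]
  simp [PySem.Dict.contains_iff_mem_keys]

lemma csm_merged_nodup (lo ln : List (String × Int)) :
    (ln.foldl (fun d p => d.insert p.1 ((d.getD p.1 ((0 : Int), (0 : Int))).1, p.2))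
        (lo.foldl (fun d p => d.insert p.1 (p.2, (0 : Int))) PySem.Dict.empty)).keys.Nodup := by
  exact PySem.Dict.nodup_keys_foldl_insert_key ln Prod.fst _ _
    (PySem.Dict.nodup_keys_foldl_insert_key lo Prod.fst _ _ PySem.Dict.nodup_keys_empty)

-- ===== VERDICT (by name: the statements are the Claim_ definitions above) =====
theorem change_stat_msg_spec : Claim_equal_change_stat_msg := by
  intro so sn _ hpre
  unfold Spec_change_stat_msg
  match so, sn with
  | none, none => rfl
  | none, some _ => rfl
  | some _, none => rfl
  | some lo, some ln =>
    simp only [change_stat_msg, change_stat_msg_alt]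
    by_cases hemp : (lo.isEmpty || ln.isEmpty) = true
    · simp [hemp]
    · simp only [hemp, if_false, Bool.false_eq_true]
      rw [PySem.List.foldl_append_if, PySem.List.foldl_append_if]
      have hlo : lo ≠ [] := by intro h; apply hemp; simp [h]
      have hln : ln ≠ [] := by intro h; apply hemp; simp [h]
      have htot : "total" ∈ lo.map Prod.fst := by
        rcases hpre with h | h | h
        · exact absurd (by simpa using h) hlo
        · exact absurd (by simpa using h) hln
        · exact h.1
      have hcont : (PySem.Dict.ofList (ν := Int) lo).contains "total" = true :=
        (csm_contains_ofList lo "total").mpr htot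
      rw [PySem.Dict.items_eq_map_keys _ (csm_merged_nodup lo ln) (0, 0)]
      rw [List.filter_map, List.map_map]
      simp only [Function.comp_def, csm_merged_getD lo ln]
      rw [csm_merged_keys lo ln, List.filter_append, List.map_append]
      -- the new-only keys are never 'total', so the ≠ 'total' filter is the identity there
      have hnewonly : ∀ (q : List String), q = (PySem.Dict.ofList (ν := Int) ln).keys.filter
            (fun k => !((PySem.Dict.ofList (ν := Int) lo).contains k)) →
          q.filter (fun k => k != "total") = q := by
        intro q hq
        apply List.filter_eq_self.mpr
        intro k hk
        rw [hq] at hk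
        have hnc := (List.mem_filter.mp hk).2
        have : ¬ (k = "total") := by
          intro h
          rw [h] at hnc
          rw [hcont] at hnc
          exact absurd hnc (by simp)
        simpa using this
      rw [hnewonly _ rfl]
      apply congrArg (PySem.Str.join "")
      simp only [List.cons_append, List.nil_append]
      apply congrArg₂ (· :: ·)
      · simp [csmRowA, csmRowB]
      apply congrArg₂ (· ++ ·)
      · apply List.map_congr_left
        intro k _
        simp [csmRowA, csmRowB]
      · apply List.map_congr_left
        intro k hk
        have hnc : (PySem.Dict.ofList (ν := Int) lo).contains k = false := by
          have := (List.mem_filter.mp hk).2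
          simpa using this
        rw [PySem.Dict.getD_of_not_contains _ _ hnc]
        simp [csmRowA, csmRowB]
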